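-- pv_equiv track=rewrite | github.com/hgg030526/coding_practice | 프로그래머스/Lv.0/등수 매기기.py | solution
-- ===== SOURCE A (Python) =====
-- def solution(score):
--     total_score = [(sum(s),i) for i,s in enumerate(score)]
--     total_score.sort(reverse = True)
--
--     ranks = [0]*len(score)
--     pre_total = -1
--     rank = 1
--
--     for i,(total,index) in enumerate(total_score):
--         if total != pre_total:
--             rank = i+1
--
--         ranks[index] = rank
--         pre_total = total
--
--     return ranks
-- ===== SOURCE B (Python) =====
-- def solution(score):
--     totals = [sum(s) for s in score]
--     return [1 + sum(1 for t in totals if t > x) for x in totals]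
-- ===== Notes on version B (the rewrite author's own statement) =====
-- stated objective: simpler
-- what changed: Replaced A's sort-then-scan (sort (total,index) tuples descending, walk them tracking previous total and rank, write into a preallocated ranks array) by a direct count: each rank is 1 plus the number of strictly greater totals, computed by a nested scan with no sorting and no mutation.
import Mathlib
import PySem

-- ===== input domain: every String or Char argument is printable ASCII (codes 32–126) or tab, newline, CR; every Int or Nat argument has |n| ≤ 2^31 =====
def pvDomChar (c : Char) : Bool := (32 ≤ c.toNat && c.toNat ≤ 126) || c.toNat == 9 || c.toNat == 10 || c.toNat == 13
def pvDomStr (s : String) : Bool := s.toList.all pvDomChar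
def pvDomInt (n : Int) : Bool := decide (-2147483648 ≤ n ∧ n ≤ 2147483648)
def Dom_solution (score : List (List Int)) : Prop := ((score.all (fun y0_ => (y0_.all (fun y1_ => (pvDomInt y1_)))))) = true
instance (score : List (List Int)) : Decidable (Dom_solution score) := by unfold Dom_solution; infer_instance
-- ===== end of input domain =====

-- B replaces A's sort-then-scan rank assignment by counting strictly greater totals directly (simpler; return value only, no mutation).

-- ===== PORT A =====
-- one iteration of A's for-loop: state (ranks, pre_total, rank), input (i, (total, index))
def solStep (st : List Int × Int × Int) (ip : Int × Int × Int) : List Int × Int × Int :=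
  let rank' := if ip.2.1 ≠ st.2.1 then ip.1 + 1 else st.2.2
  (PySem.List.pySetD st.1 ip.2.2 rank', ip.2.1, rank')

def solution (score : List (List Int)) : List Int :=
  let total_score := (PySem.List.enumerate score).map (fun p => (p.2.sum, p.1))
  let ts := PySem.List.sorted2 total_score (fun p => p.1) (fun p => p.2) true
  ((PySem.List.enumerate ts).foldl solStep (List.replicate score.length 0, -1, 1)).1

-- ===== PORT B =====
def solution_alt (score : List (List Int)) : List Int :=
  let totals := score.map (fun s => s.sum)
  totals.map (fun x => 1 + (totals.map (fun t => if x < t then (1 : Int) else 0)).sum)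

-- ===== PRECONDITION & SPEC =====
def Spec_solution (score : List (List Int)) (out : List Int) : Prop := out = solution_alt score
instance (score : List (List Int)) (out : List Int) : Decidable (Spec_solution score out) := by unfold Spec_solution; infer_instance

-- ===== CLAIM (what is proved, stated in full; the proofs are below) =====
def Claim_equal_solution : Prop := ∀ (score : List (List Int)), Dom_solution score → Spec_solution score (solution score)

-- ===== LEMMAS AND PROOFS =====

-- insertion keeps the "descending in first component" invariant
lemma pairwise_insertBy_of {α : Type} (R : α → α → Prop) (before : α → α → Bool)
    (h1 : ∀ a b, before a b = true → R a b)
    (h2 : ∀ a b, before a b = false → R b a)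
    (htrans : ∀ a b c, R a b → R b c → R a c)
    (x : α) (ys : List α) (h : ys.Pairwise R) :
    (PySem.List.insertBy before x ys).Pairwise R := by
  induction ys with
  | nil => simp [PySem.List.insertBy]
  | cons y ys ih =>
    rcases List.pairwise_cons.mp h with ⟨hy, hys⟩
    by_cases hb : before x y = true
    · simp only [PySem.List.insertBy, hb, if_true]
      refine List.pairwise_cons.mpr ⟨?_, h⟩
      intro z hz
      rcases List.mem_cons.mp hz with rfl | hz
      · exact h1 _ _ hb
      · exact htrans _ _ _ (h1 _ _ hb) (hy _ hz)
    · simp only [PySem.List.insertBy, hb]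
      refine List.pairwise_cons.mpr ⟨?_, ih hys⟩
      intro z hz
      rcases (PySem.List.mem_insertBy _ _ _ _).mp hz with rfl | hz
      · exact h2 _ _ (by simpa using hb)
      · exact hy _ hz

lemma pairwise_foldl_insertBy {α : Type} (R : α → α → Prop) (before : α → α → Bool)
    (h1 : ∀ a b, before a b = true → R a b)
    (h2 : ∀ a b, before a b = false → R b a)
    (htrans : ∀ a b c, R a b → R b c → R a c)
    (xs : List α) :
    ∀ acc : List α, acc.Pairwise R → (xs.foldl (fun acc x => PySem.List.insertBy before x acc) acc).Pairwise R := by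
  induction xs with
  | nil => intro acc h; simpa using h
  | cons x xs ih =>
    intro acc h
    exact ih _ (pairwise_insertBy_of R before h1 h2 htrans x acc h)

-- A's sorted list of (total, index) pairs is descending in the total component
lemma sorted2_rev_pairwise_fst (xs : List (Int × Int)) :
    (PySem.List.sorted2 xs (fun p => p.1) (fun p => p.2) true).Pairwise (fun a b => b.1 ≤ a.1) := by
  show (List.foldl _ [] xs).Pairwise _
  apply pairwise_foldl_insertBy
  · intro a b hb
    by_cases hd : b.1 < a.1
    · omega
    · simp [hd] at hb; omega
  · intro a b hb
    by_cases hd : b.1 < a.1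
    · simp [hd] at hb
    · omega
  · intro a b c h1 h2; omega
  · exact List.Pairwise.nil

-- membership in enumerate
lemma mem_enumerate_iff {α : Type} (xs : List α) (s : Int) (q : Int × α) (hq : q ∈ PySem.List.enumerate xs s) :
    ∃ k : Nat, ∃ h : k < xs.length, q.1 = s + k ∧ q.2 = xs[k] := by
  induction xs generalizing s with
  | nil => simp [PySem.List.enumerate_nil] at hq
  | cons x xs ih =>
    rw [PySem.List.enumerate_cons] at hq
    rcases List.mem_cons.mp hq with rfl | hq
    · exact ⟨0, by simp, by simp, by simp⟩
    · rcases ih (s + 1) hq with ⟨k, hk, h1, h2⟩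
      exact ⟨k + 1, by simpa using hk, by push_cast; omega, by simpa using h2⟩

-- main loop invariant for A's for-loop
lemma loop_spec (full : List (Int × Int)) (hfull : full.Pairwise (fun a b => b.1 ≤ a.1)) :
    ∀ (rest done : List (Int × Int)) (ranks : List Int) (pre rank : Int),
    full = done ++ rest →
    (rest.map Prod.snd).Nodup →
    (∀ p ∈ rest, 0 ≤ p.2 ∧ p.2.toNat < ranks.length) →
    ((done = [] ∧ pre = -1 ∧ rank = 1) ∨
      ((∀ p ∈ done, pre ≤ p.1) ∧ (∀ p ∈ rest, p.1 ≤ pre) ∧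
        rank = 1 + (full.countP (fun p => decide (pre < p.1)) : Int))) →
    (∀ p ∈ rest,
        (((PySem.List.enumerate rest (done.length : Int)).foldl solStep (ranks, pre, rank)).1)[p.2.toNat]? =
          some (1 + (full.countP (fun p' => decide (p.1 < p'.1)) : Int))) ∧
    (∀ j : Nat, ((j : Int) ∉ rest.map Prod.snd) →
        (((PySem.List.enumerate rest (done.length : Int)).foldl solStep (ranks, pre, rank)).1)[j]? = ranks[j]?) := by
  intro rest
  induction rest with
  | nil =>
    intro done ranks pre rank hfeq hnd hidx hinv
    refine ⟨by simp, ?_⟩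
    intro j hj
    simp [PySem.List.enumerate_nil]
  | cons q rest ih =>
    intro done ranks pre rank hfeq hnd hidx hinv
    have hpa : (done ++ q :: rest).Pairwise (fun a b => b.1 ≤ a.1) := hfeq ▸ hfull
    rcases List.pairwise_append.mp hpa with ⟨hpd, hpc, hdb⟩
    rcases List.pairwise_cons.mp hpc with ⟨hqr, hpr⟩
    have hq2 := hidx q (List.mem_cons_self)
    -- the updated rank equals 1 + (number of strictly greater totals)
    have hcnt0 : (q :: rest).countP (fun p => decide (q.1 < p.1)) = 0 := by
      refine List.countP_eq_zero.mpr ?_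
      intro p hp
      rcases List.mem_cons.mp hp with rfl | hp
      · simp
      · simpa using not_lt.mpr (hqr p hp)
    have hsplit : full.countP (fun p => decide (q.1 < p.1)) =
        done.countP (fun p => decide (q.1 < p.1)) + (q :: rest).countP (fun p => decide (q.1 < p.1)) := by
      rw [hfeq, List.countP_append]
    have hrank' : (if q.1 ≠ pre then (done.length : Int) + 1 else rank) =
        1 + (full.countP (fun p => decide (q.1 < p.1)) : Int) := by
      rcases hinv with ⟨hd0, hpre, hrk⟩ | ⟨h1, h2, hrk⟩
      · subst hd0
        simp only [List.countP_nil, Nat.zero_add] at hsplit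
        rw [hsplit, hcnt0]
        split_ifs <;> simp [hrk]
      · by_cases hne : q.1 = pre
        · simp only [hne, ne_eq, not_true_eq_false, if_false]
          exact hrk
        · have hlt : q.1 < pre := lt_of_le_of_ne (h2 q List.mem_cons_self) hne
          have hcd : done.countP (fun p => decide (q.1 < p.1)) = done.length :=
            List.countP_eq_length.mpr (fun p hp => by simpa using lt_of_lt_of_le hlt (h1 p hp))
          rw [hsplit, hcd, hcnt0]
          simp [hne]
          omega
    -- set up the inductive step
    have hfeq' : full = (done ++ [q]) ++ rest := by rw [hfeq]; simp
    have hnd' : (rest.map Prod.snd).Nodup := (List.nodup_cons.mp (by simpa using hnd)).2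
    have hnotin : q.2 ∉ rest.map Prod.snd := (List.nodup_cons.mp (by simpa using hnd)).1
    set rank' : Int := if q.1 ≠ pre then (done.length : Int) + 1 else rank with hrdef
    set ranks' : List Int := PySem.List.pySetD ranks q.2 rank' with hrsdef
    have hlen' : ranks'.length = ranks.length := PySem.List.length_pySetD _ _ _
    have hidx' : ∀ p ∈ rest, 0 ≤ p.2 ∧ p.2.toNat < ranks'.length := by
      intro p hp
      rw [hlen']
      exact hidx p (List.mem_cons_of_mem _ hp)
    have hinv' : ((done ++ [q]) = [] ∧ q.1 = -1 ∧ rank' = 1) ∨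
        ((∀ p ∈ done ++ [q], q.1 ≤ p.1) ∧ (∀ p ∈ rest, p.1 ≤ q.1) ∧
          rank' = 1 + (full.countP (fun p => decide (q.1 < p.1)) : Int)) := by
      right
      refine ⟨?_, hqr, hrank'⟩
      intro p hp
      rcases List.mem_append.mp hp with hp | hp
      · rcases hinv with ⟨hd0, _, _⟩ | ⟨h1, h2, _⟩
        · subst hd0; simp at hp
        · exact le_trans (h2 q List.mem_cons_self) (h1 p hp)
      · simp at hp; subst hp; exact le_refl _
    have hs : (done.length : Int) + 1 = (((done ++ [q]).length : Nat) : Int) := by simp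
    rcases ih (done ++ [q]) ranks' q.1 rank' hfeq' hnd' hidx' hinv' with ⟨iha, ihb⟩
    have hstep : ((PySem.List.enumerate (q :: rest) (done.length : Int)).foldl solStep (ranks, pre, rank)).1 =
        ((PySem.List.enumerate rest (((done ++ [q]).length : Nat) : Int)).foldl solStep (ranks', q.1, rank')).1 := by
      rw [PySem.List.enumerate_cons, List.foldl_cons, ← hs]
      rfl
    refine ⟨?_, ?_⟩
    · intro p hp
      rcases List.mem_cons.mp hp with rfl | hp
      · rw [hstep]
        have hj2 : ((p.2.toNat : Nat) : Int) ∉ rest.map Prod.snd := by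
          rw [Int.toNat_of_nonneg hq2.1]; exact hnotin
        rw [ihb p.2.toNat hj2, hrsdef, PySem.List.pySetD_of_nonneg _ _ hq2.1,
          List.getElem?_set_self hq2.2, hrank']
      · rw [hstep]; exact iha p hp
    · intro j hj
      have hj1 : (j : Int) ∉ rest.map Prod.snd := fun h => hj (by simp at h ⊢; right; exact h)
      have hjq : (j : Int) ≠ q.2 := fun h => hj (by simp; left; omega)
      rw [hstep, ihb j hj1, hrsdef, PySem.List.pySetD_of_nonneg _ _ hq2.1,
        List.getElem?_set_ne (by omega)]

lemma solution_eq (score : List (List Int)) : solution score = solution_alt score := by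
  set tsc := (PySem.List.enumerate score).map (fun p => (p.2.sum, p.1)) with htscdef
  set ts := PySem.List.sorted2 tsc (fun p => p.1) (fun p => p.2) true with htsdef
  have hperm : ts.Perm tsc := PySem.List.sorted2_perm tsc _ _ true
  have hpw : ts.Pairwise (fun a b => b.1 ≤ a.1) := sorted2_rev_pairwise_fst tsc
  have hsndtsc : tsc.map Prod.snd = PySem.List.pyRange 0 score.length 1 := by
    rw [htscdef, List.map_map]
    have : ((fun (p : Int × Int) => p.2) ∘ fun (p : Int × List Int) => (p.2.sum, p.1)) =
        (fun (p : Int × List Int) => p.1) := rfl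
    rw [this, PySem.List.map_fst_enumerate]
    simp
  have hsndperm : (ts.map Prod.snd).Perm (PySem.List.pyRange 0 score.length 1) := by
    rw [← hsndtsc]; exact hperm.map _
  have hnd : (ts.map Prod.snd).Nodup :=
    hsndperm.nodup_iff.mpr (PySem.List.nodup_pyRange_one 0 score.length)
  have hidx : ∀ p ∈ ts, 0 ≤ p.2 ∧ p.2.toNat < (List.replicate score.length (0 : Int)).length := by
    intro p hp
    have : p.2 ∈ PySem.List.pyRange 0 score.length 1 :=
      hsndperm.mem_iff.mp (List.mem_map_of_mem hp)
    have := PySem.List.mem_pyRange_one.mp this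
    rw [List.length_replicate]
    omega
  obtain ⟨ha, hb⟩ := loop_spec ts hpw ts [] (List.replicate score.length 0) (-1) 1
    (by simp) hnd hidx (Or.inl ⟨rfl, rfl, rfl⟩)
  -- the two sides, elementwise
  have hval : ∀ p ∈ ts, ∃ k : Nat, ∃ hk : k < score.length,
      p.2 = (k : Int) ∧ p.1 = (score[k]).sum := by
    intro p hp
    have hptsc : p ∈ tsc := hperm.mem_iff.mp hp
    rw [htscdef] at hptsc
    rcases List.mem_map.mp hptsc with ⟨x, hx, rfl⟩
    rcases mem_enumerate_iff score 0 x hx with ⟨k, hk, h1, h2⟩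
    exact ⟨k, hk, by simpa using h1, by rw [h2]⟩
  have hcnt : ∀ x : Int, ts.countP (fun p' => decide (x < p'.1)) =
      score.countP (fun s => decide (x < s.sum)) := by
    intro x
    rw [hperm.countP_eq, htscdef, List.countP_map]
    conv_rhs => rw [← PySem.List.map_snd_enumerate score 0, List.countP_map]
    rfl
  show (_ : List Int) = solution_alt score
  apply List.ext_getElem?
  intro j
  by_cases hj : j < score.length
  · obtain ⟨p, hp, hpj⟩ : ∃ p ∈ ts, p.2 = (j : Int) := by
      have : (j : Int) ∈ ts.map Prod.snd := by
        refine hsndperm.mem_iff.mpr (PySem.List.mem_pyRange_one.mpr ⟨by omega, by omega⟩)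
      rcases List.mem_map.mp this with ⟨p, hp, hpe⟩
      exact ⟨p, hp, hpe⟩
    rcases hval p hp with ⟨k, hk, hk1, hk2⟩
    have hkj : j = k := by omega
    subst hkj
    have := ha p hp
    rw [hpj] at this
    simp only [Int.toNat_natCast] at this
    rw [show ((PySem.List.enumerate ts ((List.length ([] : List (Int × Int)) : Nat) : Int)).foldl
        solStep (List.replicate score.length 0, -1, 1)).1 =
        ((PySem.List.enumerate ts).foldl solStep (List.replicate score.length 0, -1, 1)).1 from rfl] at this
    rw [solution, ← htscdef, ← htsdef, this]
    rw [solution_alt]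
    rw [List.getElem?_map]
    rw [List.getElem?_eq_getElem (by simpa using hj)]
    simp only [Option.map_some, Option.some.injEq]
    rw [hcnt p.1, hk2]
    have hsum : ∀ x : Int, ((score.map (fun s => s.sum)).map
        (fun t => if x < t then (1 : Int) else 0)).sum =
        ((score.map (fun s => s.sum)).countP (fun t => decide (x < t)) : Int) := by
      intro x
      rw [← PySem.List.sum_map_ite_one_zero (fun t => decide (x < t))]
      simp
    rw [hsum _, List.countP_map]
    rw [List.getElem_map]
    rfl
  · have hjn : (j : Int) ∉ ts.map Prod.snd := by
      intro hmem
      have := PySem.List.mem_pyRange_one.mp (hsndperm.mem_iff.mp hmem)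
      omega
    have := hb j hjn
    rw [show ((PySem.List.enumerate ts ((List.length ([] : List (Int × Int)) : Nat) : Int)).foldl
        solStep (List.replicate score.length 0, -1, 1)).1 =
        ((PySem.List.enumerate ts).foldl solStep (List.replicate score.length 0, -1, 1)).1 from rfl] at this
    rw [solution, ← htscdef, ← htsdef, this]
    rw [solution_alt]
    rw [List.getElem?_eq_none (by simpa using hj), List.getElem?_eq_none (by simp; omega)]

-- ===== VERDICT (by name: the statement is the Claim_ definition above) =====
theorem solution_spec : Claim_equal_solution := by
  intro score _
  unfold Spec_solution
  exact solution_eq score
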